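-- pv_equiv track=rewrite | github.com/Stomachion/AdventOfCode2022 | day15/Beaconsearch.py | beacon_in_line
-- ===== SOURCE A (Python) =====
-- def compute_manhatten_distance(x:tuple, y:tuple):
--     distance = 0
--     for i in range(len(x)):
--         distance += abs(x[i]-y[i])
--     return distance
--
-- class Sensorrange:
--
--     def __init__(self,sensor_position:tuple, range:int):
--         self.__senor_position = sensor_position
--         self.__range = range
--
--     def is_x_in_range(self, x:tuple):
--         if compute_manhatten_distance(x, self.__senor_position) <= self.__range:
--             return True
--         else:
--             return False
--
--     def compute_distance_to_sensor(self, x:tuple):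
--         return abs(x[0]-self.__senor_position[0]) + abs(x[1]-self.__senor_position[1])
--
--     def is_line_in_range(self, line:int):
--         ymin = self.__senor_position[1] - self.__range
--         ymax = self.__senor_position[1] + self.__range
--
--         if ymin <= line and line <= ymax:
--             return True
--         else:
--             return False
--
--     # assumes line is in range
--     def get_line_range(self, line):
--         line_range = self.__range - abs(line - self.__senor_position[1])
--         return (self.__senor_position[0]-line_range, self.__senor_position[0]+line_range)
--
--     def get_surroundig(self):
--         surrounding = []
--         r = self.__range+1
--         for i in range(0,r):
--             surrounding.append((self.__senor_position[0]+i, self.__senor_position[1]+r-i))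
--             surrounding.append((self.__senor_position[0]+i, self.__senor_position[1]-r+i))
--             surrounding.append((self.__senor_position[0]+r-i, self.__senor_position[1]+i))
--             surrounding.append((self.__senor_position[0]+r-i, self.__senor_position[1]-i))
--         return surrounding
--
-- def beacon_in_line(sensors:list, beacons:list, line, xmin:int, xmax:int):
--     xpositions = set(range(xmin,xmax+1))
--     for i in range(len(sensors)):
--         srange = compute_manhatten_distance(sensors[i], beacons[i])
--         sensorrange = Sensorrange(sensors[i], srange)
--         if sensorrange.is_line_in_range(line):
--             line_range = sensorrange.get_line_range(line)
--
--             if line_range[0] < xmin: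
--                 line_range = (xmin,line_range[1])
--             if line_range[1] > xmax:
--                 line_range = (line_range[0],xmax)
--
--             for x in range(line_range[0],line_range[1]+1):
--                 xpositions.discard(x)
--     return xpositions
-- ===== SOURCE B (Python) =====
-- def beacon_in_line(sensors, beacons, line, xmin, xmax):
--     data = [(sx, sy, abs(sx - bx) + abs(sy - by))
--             for (sx, sy), (bx, by) in zip(sensors, beacons)]
--     return {x for x in range(xmin, xmax + 1)
--             if all(abs(x - sx) + abs(line - sy) > r for sx, sy, r in data)}
-- ===== Notes on version B (the rewrite author's own statement) =====
-- stated objective: alternative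
-- what changed: Instead of materialising the whole x-range as a mutable set and erasing each sensor's covered sub-range element by element, B inverts the loops: it precomputes (sensor, radius) once via zip and keeps exactly the x in [xmin,xmax] whose Manhattan distance to every sensor exceeds that sensor's radius.
import Mathlib
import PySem

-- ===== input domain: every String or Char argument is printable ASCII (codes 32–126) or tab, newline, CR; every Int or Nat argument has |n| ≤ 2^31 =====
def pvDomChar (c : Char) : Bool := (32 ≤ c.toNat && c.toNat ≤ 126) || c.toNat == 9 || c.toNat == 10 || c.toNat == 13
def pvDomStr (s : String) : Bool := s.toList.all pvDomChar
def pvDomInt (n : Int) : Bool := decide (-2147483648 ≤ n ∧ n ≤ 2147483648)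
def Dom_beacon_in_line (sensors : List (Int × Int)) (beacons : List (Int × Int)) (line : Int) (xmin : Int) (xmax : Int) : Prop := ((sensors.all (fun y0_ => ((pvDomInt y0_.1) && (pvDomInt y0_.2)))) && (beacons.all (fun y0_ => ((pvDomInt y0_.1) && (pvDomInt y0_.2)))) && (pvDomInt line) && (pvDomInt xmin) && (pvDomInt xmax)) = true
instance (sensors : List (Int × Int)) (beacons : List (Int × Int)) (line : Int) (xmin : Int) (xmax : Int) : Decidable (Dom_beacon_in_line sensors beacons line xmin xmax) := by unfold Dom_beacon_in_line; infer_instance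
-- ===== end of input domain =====

-- B inverts A's loops: it keeps each x in [xmin,xmax] whose distance to every sensor exceeds that
-- sensor's radius, instead of erasing each sensor's covered sub-range from a materialised set
-- (objective: alternative).

-- ===== PORT A =====
-- compute_manhatten_distance on a 2-tuple: the range(len(x)) loop unrolled over the two components (exact for pairs)
def pvDistA (x y : Int × Int) : Int := |x.1 - y.1| + |x.2 - y.2|

def beacon_in_line (sensors : List (Int × Int)) (beacons : List (Int × Int)) (line : Int) (xmin : Int) (xmax : Int) : List Int :=
  -- xpositions is a Python hash set of ints; modelled as Std.HashSet so that discard is O(1) as in CPython.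
  -- The returned set's DISTINCT elements are produced in the set model's (insertion) order of
  -- set(range(xmin, xmax+1)): the surviving elements of the base range (set outputs are compared ignoring order).
  let xpositions0 : Std.HashSet Int :=
    (PySem.List.pyRange xmin (xmax + 1) 1).foldl (fun s x => s.insert x) ∅  -- set(range(xmin, xmax+1))
  let final : Std.HashSet Int :=
    (PySem.List.pyRange 0 sensors.length 1).foldl
      (fun xpositions i =>
        -- sensors[i] / beacons[i]: total form pyGetD; Pre_ guarantees both indexings are in range
        let s := PySem.List.pyGetD sensors i (0, 0)
        let b := PySem.List.pyGetD beacons i (0, 0)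
        let srange := pvDistA s b
        if s.2 - srange ≤ line ∧ line ≤ s.2 + srange then
          let line_range := srange - |line - s.2|
          let lo0 := s.1 - line_range
          let hi0 := s.1 + line_range
          let lo1 := if lo0 < xmin then xmin else lo0
          let hi1 := if hi0 > xmax then xmax else hi0
          (PySem.List.pyRange lo1 (hi1 + 1) 1).foldl (fun xp x => xp.erase x) xpositions
        else xpositions)
      xpositions0
  (PySem.List.pyRange xmin (xmax + 1) 1).filter (fun x => final.contains x)

-- ===== PORT B =====
def beacon_in_line_alt (sensors : List (Int × Int)) (beacons : List (Int × Int)) (line : Int) (xmin : Int) (xmax : Int) : List Int :=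
  let data := (sensors.zip beacons).map
    (fun p => (p.1.1, p.1.2, |p.1.1 - p.2.1| + |p.1.2 - p.2.2|))
  -- the set comprehension ranges over pairwise-distinct x (a filtered range), so the resulting
  -- PySem set (first occurrences in order) is that filtered range itself
  ((PySem.List.pyRange xmin (xmax + 1) 1).filter
      (fun x => data.all (fun t => decide (|x - t.1| + |line - t.2.1| > t.2.2))) : PySem.Set Int)

-- ===== PRECONDITION & SPEC =====
-- Pre_ excludes only inputs on which A raises IndexError (beacons[i] with i ≥ len(beacons)).
def Pre_beacon_in_line (sensors : List (Int × Int)) (beacons : List (Int × Int)) (line : Int) (xmin : Int) (xmax : Int) : Prop :=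
  sensors.length ≤ beacons.length
instance (sensors : List (Int × Int)) (beacons : List (Int × Int)) (line : Int) (xmin : Int) (xmax : Int) : Decidable (Pre_beacon_in_line sensors beacons line xmin xmax) := by unfold Pre_beacon_in_line; infer_instance

def pvWitness_beacon_in_line : (List (Int × Int)) × (List (Int × Int)) × Int × Int × Int :=
  ([(2, 3), (9, 1)], [(2, 5), (9, 1)], 4, 0, 10)

def Spec_beacon_in_line (sensors : List (Int × Int)) (beacons : List (Int × Int)) (line : Int) (xmin : Int) (xmax : Int) (out : List Int) : Prop := out = beacon_in_line_alt sensors beacons line xmin xmax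
instance (sensors : List (Int × Int)) (beacons : List (Int × Int)) (line : Int) (xmin : Int) (xmax : Int) (out : List Int) : Decidable (Spec_beacon_in_line sensors beacons line xmin xmax out) := by unfold Spec_beacon_in_line; infer_instance

-- ===== CLAIM (what is proved, stated in full; the proofs are below) =====
def Claim_equal_beacon_in_line : Prop := ∀ (sensors : List (Int × Int)) (beacons : List (Int × Int)) (line : Int) (xmin : Int) (xmax : Int), Dom_beacon_in_line sensors beacons line xmin xmax → Pre_beacon_in_line sensors beacons line xmin xmax → Spec_beacon_in_line sensors beacons line xmin xmax (beacon_in_line sensors beacons line xmin xmax)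

-- ===== LEMMAS AND PROOFS =====

-- A's loop body on the (sensor, beacon) pair, with the lets inlined (definitionally equal to the body)
def pvStepH (line xmin xmax : Int) (xpositions : Std.HashSet Int) (s b : Int × Int) : Std.HashSet Int :=
  if s.2 - pvDistA s b ≤ line ∧ line ≤ s.2 + pvDistA s b then
    (PySem.List.pyRange
      (if s.1 - (pvDistA s b - |line - s.2|) < xmin then xmin else s.1 - (pvDistA s b - |line - s.2|))
      ((if s.1 + (pvDistA s b - |line - s.2|) > xmax then xmax else s.1 + (pvDistA s b - |line - s.2|)) + 1)
      1).foldl (fun xp x => xp.erase x) xpositions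
  else xpositions

-- "x is not covered by the sensor of the pair p"
def pvPred (line : Int) (p : (Int × Int) × (Int × Int)) (x : Int) : Bool :=
  decide (|x - p.1.1| + |line - p.1.2| > pvDistA p.1 p.2)

lemma pv_contains_foldl_erase (L : List Int) (S : Std.HashSet Int) (x : Int) :
    ((L.foldl (fun xp y => xp.erase y) S).contains x) = (S.contains x && !L.contains x) := by
  induction L generalizing S with
  | nil => simp
  | cons y L ih =>
    simp only [List.foldl_cons, ih, Std.HashSet.contains_erase, List.contains_cons]
    have hxy : (x == y) = (y == x) := by rw [Bool.eq_iff_iff, beq_iff_eq, beq_iff_eq]; exact eq_comm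
    rw [hxy]
    cases y == x <;> cases S.contains x <;> cases L.contains x <;> rfl

lemma pv_contains_foldl_insert (L : List Int) (S : Std.HashSet Int) (x : Int) :
    ((L.foldl (fun xp y => xp.insert y) S).contains x) = (S.contains x || L.contains x) := by
  induction L generalizing S with
  | nil => simp
  | cons y L ih =>
    simp only [List.foldl_cons, ih, Std.HashSet.contains_insert, List.contains_cons]
    have hxy : (x == y) = (y == x) := by rw [Bool.eq_iff_iff, beq_iff_eq, beq_iff_eq]; exact eq_comm
    rw [hxy]
    cases y == x <;> cases S.contains x <;> cases L.contains x <;> rfl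

lemma pv_stepH_eq (line xmin xmax : Int) (p : (Int × Int) × (Int × Int)) (S : Std.HashSet Int)
    (x : Int) (hx1 : xmin ≤ x) (hx2 : x ≤ xmax) :
    (pvStepH line xmin xmax S p.1 p.2).contains x = (S.contains x && pvPred line p x) := by
  have habs : pvPred line p x =
      !decide ((p.1.1 - (pvDistA p.1 p.2 - |line - p.1.2|) ≤ x ∧
        x ≤ p.1.1 + (pvDistA p.1 p.2 - |line - p.1.2|))) := by
    simp only [pvPred, pvDistA]
    rcases abs_cases (x - p.1.1) with ⟨e1, h1⟩ | ⟨e1, h1⟩ <;>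
      rcases abs_cases (line - p.1.2) with ⟨e2, h2⟩ | ⟨e2, h2⟩ <;>
      rw [e1, e2] <;> rw [Bool.eq_iff_iff] <;>
      simp only [decide_eq_true_eq, Bool.not_eq_true', decide_eq_false_iff_not] <;> omega
  have hmem : (PySem.List.pyRange
      (if p.1.1 - (pvDistA p.1 p.2 - |line - p.1.2|) < xmin then xmin else p.1.1 - (pvDistA p.1 p.2 - |line - p.1.2|))
      ((if p.1.1 + (pvDistA p.1 p.2 - |line - p.1.2|) > xmax then xmax else p.1.1 + (pvDistA p.1 p.2 - |line - p.1.2|)) + 1)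
      1).contains x =
      decide ((p.1.1 - (pvDistA p.1 p.2 - |line - p.1.2|) ≤ x ∧
        x ≤ p.1.1 + (pvDistA p.1 p.2 - |line - p.1.2|))) := by
    rw [Bool.eq_iff_iff]
    simp only [List.contains_iff_mem, PySem.List.mem_pyRange_one, decide_eq_true_eq]
    split_ifs <;> omega
  unfold pvStepH
  by_cases hg : p.1.2 - pvDistA p.1 p.2 ≤ line ∧ line ≤ p.1.2 + pvDistA p.1 p.2
  · rw [if_pos hg, pv_contains_foldl_erase, hmem, habs]
  · rw [if_neg hg]
    have hp : pvPred line p x = true := by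
      rw [habs]
      simp only [Bool.not_eq_true', decide_eq_false_iff_not]
      rcases abs_cases (line - p.1.2) with ⟨e2, hh⟩ | ⟨e2, hh⟩ <;> rw [e2] at * <;>
        simp only [pvDistA, not_and_or, not_le] at hg ⊢ <;> omega
    rw [hp, Bool.and_true]

lemma pv_loopH_eq (line xmin xmax : Int) (ps : List ((Int × Int) × (Int × Int)))
    (S : Std.HashSet Int) (x : Int) (hx1 : xmin ≤ x) (hx2 : x ≤ xmax) :
    ((ps.foldl (fun acc p => pvStepH line xmin xmax acc p.1 p.2) S).contains x) =
      (S.contains x && ps.all (fun p => pvPred line p x)) := by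
  induction ps generalizing S with
  | nil => simp
  | cons p ps ih =>
    simp only [List.foldl_cons, List.all_cons]
    rw [ih (pvStepH line xmin xmax S p.1 p.2), pv_stepH_eq line xmin xmax p S x hx1 hx2,
      Bool.and_assoc]

theorem pv_main (sensors beacons : List (Int × Int)) (line xmin xmax : Int)
    (hpre : sensors.length ≤ beacons.length) :
    beacon_in_line sensors beacons line xmin xmax = beacon_in_line_alt sensors beacons line xmin xmax := by
  have hzlen : (sensors.zip beacons).length = sensors.length := by
    rw [List.length_zip]; omega
  simp only [beacon_in_line]
  -- index loop = fold over the zip list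
  have hlen' : (sensors.length : Int) = PySem.List.len (sensors.zip beacons) := by
    simp [PySem.List.len, hzlen]
  rw [hlen']
  rw [PySem.List.foldl_congr_mem (PySem.List.pyRange 0 (PySem.List.len (sensors.zip beacons)) 1) _
      (fun acc j => pvStepH line xmin xmax acc
        (PySem.List.pyGetD (sensors.zip beacons) j ((0,0),(0,0))).1
        (PySem.List.pyGetD (sensors.zip beacons) j ((0,0),(0,0))).2) _ ?hcongr]
  case hcongr =>
    intro acc i hi
    have hi' : 0 ≤ i ∧ i < ((sensors.zip beacons).length : Int) := by
      have := PySem.List.mem_pyRange_one.mp hi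
      simpa [PySem.List.len] using this
    have hi2 : i < (sensors.length : Int) := by omega
    have hi3 : i < (beacons.length : Int) := by omega
    have he : PySem.List.pyGetD (sensors.zip beacons) i ((0,0),(0,0)) =
        (PySem.List.pyGetD sensors i (0,0), PySem.List.pyGetD beacons i (0,0)) := by
      rw [PySem.List.pyGetD_eq_getElem _ _ hi'.1 hi'.2,
          PySem.List.pyGetD_eq_getElem sensors (0,0) hi'.1 hi2,
          PySem.List.pyGetD_eq_getElem beacons (0,0) hi'.1 hi3]
      simp [List.getElem_zip]
    beta_reduce
    rw [he]
    rfl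
  rw [PySem.List.foldl_pyRange_pyGetD (sensors.zip beacons) ((0,0),(0,0))
      (fun acc p => pvStepH line xmin xmax acc p.1 p.2) _ le_rfl]
  simp only [Int.toNat_zero, List.drop_zero]
  unfold beacon_in_line_alt
  apply List.filter_congr
  intro x hx
  have hb := PySem.List.mem_pyRange_one.mp hx
  rw [pv_loopH_eq line xmin xmax _ _ x hb.1 (by omega), pv_contains_foldl_insert]
  have hin : (PySem.List.pyRange xmin (xmax + 1) 1).contains x = true := by
    simp only [List.contains_iff_mem]
    exact hx
  rw [Std.HashSet.contains_empty, hin, Bool.false_or, Bool.true_and]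
  simp [List.all_map, Function.comp_def, pvPred, pvDistA]

-- ===== VERDICT (by name: the statement is the Claim_ definition above) =====
theorem beacon_in_line_spec : Claim_equal_beacon_in_line := by
  intro sensors beacons line xmin xmax _ hpre
  unfold Spec_beacon_in_line
  exact pv_main sensors beacons line xmin xmax hpre
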